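-- pv_equiv track=rewrite | github.com/abconsult/fashion-video-bot | services/scraper.py | _wb_basket
-- ===== SOURCE A (Python) =====
-- def _wb_basket(vol: int) -> int:
--     """Wildberries CDN basket number by vol."""
--     thresholds = [
--         (143, 1), (287, 2), (431, 3), (719, 4), (1007, 5),
--         (1061, 6), (1115, 7), (1169, 8), (1313, 9), (1601, 10),
--         (1655, 11), (1919, 12), (2045, 13), (2189, 14), (2405, 15),
--         (2621, 16), (2837, 17),
--     ]
--     for threshold, basket in thresholds:
--         if vol <= threshold:
--             return basket
--     return 18
-- ===== SOURCE B (Python) =====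
-- import bisect
--
-- _CUTOFFS = [143, 287, 431, 719, 1007, 1061, 1115, 1169, 1313,
--             1601, 1655, 1919, 2045, 2189, 2405, 2621, 2837]
--
-- def _wb_basket(vol: int) -> int:
--     """Wildberries CDN basket number by vol."""
--     return bisect.bisect_left(_CUTOFFS, vol) + 1
-- ===== Notes on version B (the rewrite author's own statement) =====
-- stated objective: idiomatic
-- what changed: Replaced the linear scan over (threshold, basket) pairs by a binary search (bisect_left) over a sorted cutoff list, returning index+1.
import Mathlib
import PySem

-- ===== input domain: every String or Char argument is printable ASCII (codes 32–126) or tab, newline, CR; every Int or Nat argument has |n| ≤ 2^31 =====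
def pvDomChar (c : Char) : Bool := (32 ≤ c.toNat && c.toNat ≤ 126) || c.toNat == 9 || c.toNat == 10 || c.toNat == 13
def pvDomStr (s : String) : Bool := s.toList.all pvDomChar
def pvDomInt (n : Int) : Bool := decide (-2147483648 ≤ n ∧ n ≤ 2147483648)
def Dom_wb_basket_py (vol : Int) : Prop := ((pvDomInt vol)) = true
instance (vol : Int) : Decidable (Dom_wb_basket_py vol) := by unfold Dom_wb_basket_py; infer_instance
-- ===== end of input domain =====

-- B replaces A's linear scan over (threshold, basket) pairs by bisect_left binary search on the sorted cutoffs (idiomatic).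
-- ===== PORT A =====
-- the early-return scan over the thresholds list of A
def wbScan (vol : Int) : List (Int × Int) → Int
  | [] => 18
  | (threshold, basket) :: rest => if vol ≤ threshold then basket else wbScan vol rest

def wb_basket_py (vol : Int) : Int :=
  wbScan vol [(143, 1), (287, 2), (431, 3), (719, 4), (1007, 5),
    (1061, 6), (1115, 7), (1169, 8), (1313, 9), (1601, 10),
    (1655, 11), (1919, 12), (2045, 13), (2189, 14), (2405, 15),
    (2621, 16), (2837, 17)]

-- ===== PORT B =====
def wbCutoffs : List Int := [143, 287, 431, 719, 1007, 1061, 1115, 1169, 1313,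
  1601, 1655, 1919, 2045, 2189, 2405, 2621, 2837]

-- transliteration of CPython's bisect_left loop: while lo < hi: mid=(lo+hi)//2; if a[mid] < x: lo=mid+1 else hi=mid
def wbBisectLeft (a : List Int) (x : Int) (lo hi : Nat) : Nat :=
  if _h : lo < hi then
    let mid := (lo + hi) / 2
    if a.getD mid 0 < x then wbBisectLeft a x (mid + 1) hi
    else wbBisectLeft a x lo mid
  else lo
termination_by hi - lo
decreasing_by all_goals omega

def wb_basket_py_alt (vol : Int) : Int :=
  (wbBisectLeft wbCutoffs vol 0 wbCutoffs.length : Int) + 1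

-- ===== PRECONDITION & SPEC =====
def Spec_wb_basket_py (vol : Int) (out : Int) : Prop := out = wb_basket_py_alt vol
instance (vol : Int) (out : Int) : Decidable (Spec_wb_basket_py vol out) := by unfold Spec_wb_basket_py; infer_instance

-- ===== CLAIM (what is proved, stated in full; the proofs are below) =====
def Claim_equal_wb_basket_py : Prop := ∀ (vol : Int), Dom_wb_basket_py vol → Spec_wb_basket_py vol (wb_basket_py vol)

-- ===== LEMMAS AND PROOFS =====

-- ===== VERDICT (by name: the statement is the Claim_ definition above) =====
set_option maxHeartbeats 2000000 in
theorem wb_basket_py_spec : Claim_equal_wb_basket_py := by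
  intro vol hd
  clear hd
  unfold Spec_wb_basket_py wb_basket_py wb_basket_py_alt
  simp only [wbCutoffs, List.length_cons, List.length_nil, wbScan]
  repeat (rw [wbBisectLeft]
          simp only [List.getD, Nat.reduceAdd, Nat.reduceDiv, Nat.reduceLT,
            List.getElem?_cons_succ, List.getElem?_cons_zero, List.getElem?_nil,
            Option.getD_some, dite_eq_ite, if_true, if_false])
  simp only [Nat.cast_ite]
  omega
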